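-- pv_equiv track=rewrite | github.com/MNico99/Sintaxis-TP01 | GLex.py | A_ID
-- ===== SOURCE A (Python) =====
-- TRAMPA = -1
--
-- RESULTADO_ACEPTADO = "ACEPTADO"
--
-- RESULTADO_TRAMPA = "TRAMPA"
--
-- RESULTADO_NO_ACEPTADO = "NO_ACEPTADO"
--
-- digito = ["0", "1", "2", "3", "4", "5", "6", "7", "8", "9"]
--
-- letra = ["a", "b", "c", "d", "e", "f", "g", "h", "i", "j", "k", "l", "m", "n", "ñ", "o",
-- "p", "q", "r", "s", "t", "u", "v", "w", "x", "y", "z", "A", "B", "C", "D", "E",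
-- "F", "G", "H", "I", "J", "K", "L", "M", "N", "Ñ", "O", "P", "Q", "R", "S", "T",
-- "U", "V", "W", "X", "Y", "Z"]
--
-- def d_ID(estado_anterior, caracter):
--     if estado_anterior == 0 and caracter in letra:
--         return 1
--     if estado_anterior == 1 and caracter in letra:
--         return 1
--     if estado_anterior == 1 and caracter in digito:
--         return 1
--
--
--     return TRAMPA
--
-- def A_ID(cadena):
--     Finales = [1]
--     estado_actual = 0
--
--     for caracter in cadena:
--         estado_proximo = d_ID(estado_actual, caracter)
--         if estado_proximo == TRAMPA:
--             return RESULTADO_TRAMPA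
--         estado_actual = estado_proximo
--
--     if estado_actual in Finales:
--         return RESULTADO_ACEPTADO
--     else:
--         return RESULTADO_NO_ACEPTADO
-- ===== SOURCE B (Python) =====
-- TRAMPA = -1
-- RESULTADO_ACEPTADO = "ACEPTADO"
-- RESULTADO_TRAMPA = "TRAMPA"
-- RESULTADO_NO_ACEPTADO = "NO_ACEPTADO"
--
-- _LETRA = set("abcdefghijklmnñopqrstuvwxyzABCDEFGHIJKLMNÑOPQRSTUVWXYZ")
-- _DIGITO = set("0123456789")
--
-- def A_ID(cadena):
--     if not cadena:
--         return RESULTADO_NO_ACEPTADO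
--     if cadena[0] not in _LETRA:
--         return RESULTADO_TRAMPA
--     for ch in cadena[1:]:
--         if ch not in _LETRA and ch not in _DIGITO:
--             return RESULTADO_TRAMPA
--     return RESULTADO_ACEPTADO
-- ===== Notes on version B (the rewrite author's own statement) =====
-- stated objective: simpler
-- what changed: Drops the DFA (no estado_actual and no d_ID transition helper): B returns NO_ACEPTADO on the empty string, TRAMPA if the first character is not a letter, then scans the rest for any character that is neither letter nor digit.
import Mathlib
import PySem

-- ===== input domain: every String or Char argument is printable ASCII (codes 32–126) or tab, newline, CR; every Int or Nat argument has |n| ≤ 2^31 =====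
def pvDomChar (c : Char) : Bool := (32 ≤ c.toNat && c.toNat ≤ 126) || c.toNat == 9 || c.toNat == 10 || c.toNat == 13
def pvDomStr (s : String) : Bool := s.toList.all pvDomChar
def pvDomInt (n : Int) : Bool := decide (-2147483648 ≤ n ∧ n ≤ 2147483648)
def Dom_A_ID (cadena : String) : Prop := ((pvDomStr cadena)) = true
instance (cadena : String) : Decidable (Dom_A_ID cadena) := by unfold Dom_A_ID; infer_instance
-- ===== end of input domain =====

-- B replaces A's DFA (estado_actual + d_ID transition table) by direct checks:
-- empty → NO_ACEPTADO, first char not a letter → TRAMPA, any later char neither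
-- letter nor digit → TRAMPA, else ACEPTADO. Objective: simpler.

-- ===== PORT A =====
def pvDigito : List Char := ['0','1','2','3','4','5','6','7','8','9']
def pvLetra : List Char :=
  ['a','b','c','d','e','f','g','h','i','j','k','l','m','n','ñ','o',
   'p','q','r','s','t','u','v','w','x','y','z','A','B','C','D','E',
   'F','G','H','I','J','K','L','M','N','Ñ','O','P','Q','R','S','T',
   'U','V','W','X','Y','Z']

def d_ID (estado_anterior : Int) (caracter : Char) : Int :=
  if estado_anterior = 0 ∧ caracter ∈ pvLetra then 1
  else if estado_anterior = 1 ∧ caracter ∈ pvLetra then 1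
  else if estado_anterior = 1 ∧ caracter ∈ pvDigito then 1
  else (-1)

-- the for-loop of A, with early return TRAMPA
def A_ID_loop (cs : List Char) (estado_actual : Int) : String :=
  match cs with
  | [] => if estado_actual ∈ ([1] : List Int) then "ACEPTADO" else "NO_ACEPTADO"
  | c :: rest =>
      let estado_proximo := d_ID estado_actual c
      if estado_proximo = (-1 : Int) then "TRAMPA"
      else A_ID_loop rest estado_proximo

def A_ID (cadena : String) : String := A_ID_loop cadena.toList 0

-- ===== PORT B =====
def isLetraB (c : Char) : Bool := pvLetra.contains c
def isDigitoB (c : Char) : Bool := pvDigito.contains c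

-- B's tail loop: TRAMPA on the first char that is neither letter nor digit, else ACEPTADO
def A_ID_rest (cs : List Char) : String :=
  match cs with
  | [] => "ACEPTADO"
  | c :: rest => if ¬ isLetraB c ∧ ¬ isDigitoB c then "TRAMPA" else A_ID_rest rest

def A_ID_alt (cadena : String) : String :=
  match cadena.toList with
  | [] => "NO_ACEPTADO"
  | c :: rest => if ¬ isLetraB c then "TRAMPA" else A_ID_rest rest

-- ===== PRECONDITION & SPEC =====
def Spec_A_ID (cadena : String) (out : String) : Prop := out = A_ID_alt cadena
instance (cadena : String) (out : String) : Decidable (Spec_A_ID cadena out) := by unfold Spec_A_ID; infer_instance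

-- ===== CLAIM (what is proved, stated in full; the proofs are below) =====
def Claim_equal_A_ID : Prop := ∀ (cadena : String), Dom_A_ID cadena → Spec_A_ID cadena (A_ID cadena)

-- ===== LEMMAS AND PROOFS =====

lemma isLetraB_iff (c : Char) : isLetraB c = true ↔ c ∈ pvLetra := by
  simp [isLetraB]

lemma isDigitoB_iff (c : Char) : isDigitoB c = true ↔ c ∈ pvDigito := by
  simp [isDigitoB]

lemma d_ID_one (c : Char) :
    d_ID 1 c = if isLetraB c ∨ isDigitoB c then 1 else -1 := by
  simp only [d_ID]
  split_ifs with h1 h2 h3 h4 <;>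
    simp_all [isLetraB_iff, isDigitoB_iff]

lemma loop_one_eq_rest (cs : List Char) : A_ID_loop cs 1 = A_ID_rest cs := by
  induction cs with
  | nil => simp [A_ID_loop, A_ID_rest]
  | cons c rest ih =>
      simp only [A_ID_loop, A_ID_rest, d_ID_one]
      by_cases h : isLetraB c ∨ isDigitoB c
      · rcases h with h | h <;> simp [h, ih]
      · have h1 : isLetraB c = false := by revert h; cases isLetraB c <;> simp
        have h2 : isDigitoB c = false := by revert h; cases isDigitoB c <;> simp
        simp [h1, h2]

-- ===== VERDICT (by name: the statement is the Claim_ definition above) =====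
theorem A_ID_spec : Claim_equal_A_ID := by
  intro cadena _
  show A_ID cadena = A_ID_alt cadena
  unfold A_ID A_ID_alt
  cases h : cadena.toList with
  | nil => simp [A_ID_loop]
  | cons c rest =>
      simp only [A_ID_loop]
      by_cases hl : isLetraB c
      · have hm : c ∈ pvLetra := (isLetraB_iff c).mp hl
        have : d_ID 0 c = 1 := by simp [d_ID, hm]
        simp [this, hl, loop_one_eq_rest]
      · have hm : c ∉ pvLetra := fun hc => hl ((isLetraB_iff c).mpr hc)
        have : d_ID 0 c = -1 := by simp [d_ID, hm]
        simp [this, hl]
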